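-- pv_equiv track=rewrite | github.com/dylan-lebreton/treeproject | tests/test_summary.py | _extract_blocks
-- ===== SOURCE A (Python) =====
-- def _extract_blocks(s: str):
--     """
--     Extract (header, body) blocks from the output. Same logic as in test_content.
--     """
--     blocks = []
--     header = None
--     body = []
--
--     for line in s.splitlines():
--         if line.startswith('"""'):
--             if line == '"""':
--                 if header is not None:
--                     blocks.append((header, "\n".join(body)))
--                     header, body = None, []
--             else:
--                 if header is not None:
--                     blocks.append((header, "\n".join(body)))
--                     body = []
--                 header = line[3:]
--         else:
--             if header is not None:
--                 body.append(line)
--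
--     if header is not None:
--         blocks.append((header, "\n".join(body)))
--
--     return blocks
-- ===== SOURCE B (Python) =====
-- def _extract_blocks(s: str):
--     # Single backward pass: scan the lines in reverse, collecting body lines
--     # until a marker line is met; an opener marker emits its block at the front.
--     blocks = []
--     body = []
--     for line in reversed(s.splitlines()):
--         if line.startswith('"""'):
--             if line != '"""':
--                 blocks.insert(0, (line[3:], "\n".join(body)))
--             body = []
--         else:
--             body.insert(0, line)
--     return blocks
-- ===== Notes on version B (the rewrite author's own statement) =====
-- stated objective: alternative
-- what changed: Replaces A's forward state machine (Optional header, body accumulator, end-of-loop flush) by a single backward pass over reversed lines that builds the output back-to-front with no header state and no final flush.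
import Mathlib
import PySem

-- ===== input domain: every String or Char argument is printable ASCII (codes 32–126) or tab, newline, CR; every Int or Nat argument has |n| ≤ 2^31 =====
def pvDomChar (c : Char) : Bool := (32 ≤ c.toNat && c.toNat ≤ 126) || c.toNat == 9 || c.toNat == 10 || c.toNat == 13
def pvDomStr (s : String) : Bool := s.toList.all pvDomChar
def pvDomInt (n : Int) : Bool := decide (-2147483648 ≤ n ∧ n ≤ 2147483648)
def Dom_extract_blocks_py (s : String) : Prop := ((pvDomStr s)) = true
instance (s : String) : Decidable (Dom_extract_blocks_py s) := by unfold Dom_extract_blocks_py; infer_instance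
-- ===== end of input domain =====

-- B replaces A's forward state machine (Optional header + final flush) by a single
-- backward pass that builds the output back-to-front with no header state (objective: alternative).

-- ===== PORT A =====
-- one loop iteration of A: state = (blocks, header, body)
def pvStepA (st : List (String × String) × Option String × List String) (line : String) :
    List (String × String) × Option String × List String :=
  if PySem.Str.startswith line "\"\"\"" then
    if line = "\"\"\"" then
      match st.2.1 with
      | some h => (st.1 ++ [(h, PySem.Str.join "\n" st.2.2)], none, [])
      | none => st
    else
      match st.2.1 with
      | some h => (st.1 ++ [(h, PySem.Str.join "\n" st.2.2)],
                   some (PySem.Str.slice line (some 3) none), [])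
      | none => (st.1, some (PySem.Str.slice line (some 3) none), st.2.2)
  else
    match st.2.1 with
    | some h => (st.1, some h, st.2.2 ++ [line])
    | none => st

def extract_blocks_py (s : String) : List (String × String) :=
  let st := (PySem.Str.splitlines s).foldl pvStepA ([], none, [])
  match st.2.1 with
  | some h => st.1 ++ [(h, PySem.Str.join "\n" st.2.2)]
  | none => st.1

-- ===== PORT B =====
-- one iteration of B's reversed loop: state = (blocks, body)
def pvStepB (line : String) (st : List (String × String) × List String) :
    List (String × String) × List String :=
  if PySem.Str.startswith line "\"\"\"" then
    if line ≠ "\"\"\"" then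
      ((PySem.Str.slice line (some 3) none, PySem.Str.join "\n" st.2) :: st.1, [])
    else (st.1, [])
  else (st.1, line :: st.2)

def extract_blocks_py_alt (s : String) : List (String × String) :=
  ((PySem.Str.splitlines s).reverse.foldl (fun st line => pvStepB line st) ([], [])).1

-- ===== PRECONDITION & SPEC =====
def Spec_extract_blocks_py (s : String) (out : List (String × String)) : Prop := out = extract_blocks_py_alt s
instance (s : String) (out : List (String × String)) : Decidable (Spec_extract_blocks_py s out) := by unfold Spec_extract_blocks_py; infer_instance

-- ===== CLAIM (what is proved, stated in full; the proofs are below) =====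
def Claim_equal_extract_blocks_py : Prop := ∀ (s : String), Dom_extract_blocks_py s → Spec_extract_blocks_py s (extract_blocks_py s)

-- ===== LEMMAS AND PROOFS =====

-- reference recursive characterisation of the block structure of a line list
mutual
def pvSpecN : List String → List (String × String)
  | [] => []
  | l :: ls =>
    if PySem.Str.startswith l "\"\"\"" then
      if l = "\"\"\"" then pvSpecN ls
      else pvSpecO (PySem.Str.slice l (some 3) none) [] ls
    else pvSpecN ls
def pvSpecO (h : String) (b : List String) : List String → List (String × String)
  | [] => [(h, PySem.Str.join "\n" b)]
  | l :: ls =>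
    if PySem.Str.startswith l "\"\"\"" then
      if l = "\"\"\"" then (h, PySem.Str.join "\n" b) :: pvSpecN ls
      else (h, PySem.Str.join "\n" b) :: pvSpecO (PySem.Str.slice l (some 3) none) [] ls
    else pvSpecO h (b ++ [l]) ls
end

def pvPlain (l : String) : Bool := !(PySem.Str.startswith l "\"\"\"")

def pvFinish (st : List (String × String) × Option String × List String) : List (String × String) :=
  match st.2.1 with
  | some h => st.1 ++ [(h, PySem.Str.join "\n" st.2.2)]
  | none => st.1

theorem pvQq : PySem.Chars.startswith ['\"', '\"', '\"'] ['\"', '\"', '\"'] = true := by decide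

theorem pvA_run (ls : List String) : ∀ (bs : List (String × String)) (hdr : Option String) (b : List String),
    (hdr = none → b = []) →
    pvFinish (ls.foldl pvStepA (bs, hdr, b)) =
      bs ++ (match hdr with | none => pvSpecN ls | some h => pvSpecO h b ls) := by
  induction ls with
  | nil => intro bs hdr b _; cases hdr <;> simp [pvFinish, pvSpecN, pvSpecO]
  | cons l ls ih =>
    intro bs hdr b hb
    cases hdr with
    | none =>
      have hb' : b = [] := hb rfl
      subst hb'
      by_cases hs : PySem.Chars.startswith l.toList ['\"', '\"', '\"'] = true
      · by_cases he : l = "\"\"\""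
        · have hstep : pvStepA (bs, none, []) l = (bs, none, []) := by
            simp [pvStepA, hs, he, pvQq]
          rw [List.foldl_cons, hstep, ih bs none [] (fun _ => rfl)]
          simp [pvSpecN, hs, he, pvQq]
        · have hstep : pvStepA (bs, none, []) l
              = (bs, some (PySem.Str.slice l (some 3) none), []) := by
            simp [pvStepA, hs, he, pvQq]
          rw [List.foldl_cons, hstep, ih bs (some _) [] (by simp)]
          simp [pvSpecN, hs, he]
      · have hstep : pvStepA (bs, none, []) l = (bs, none, []) := by
          simp [pvStepA, hs]
        rw [List.foldl_cons, hstep, ih bs none [] (fun _ => rfl)]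
        simp [pvSpecN, hs]
    | some h =>
      by_cases hs : PySem.Chars.startswith l.toList ['\"', '\"', '\"'] = true
      · by_cases he : l = "\"\"\""
        · have hstep : pvStepA (bs, some h, b) l
              = (bs ++ [(h, PySem.Str.join "\n" b)], none, []) := by
            simp [pvStepA, hs, he, pvQq]
          rw [List.foldl_cons, hstep, ih _ none [] (fun _ => rfl)]
          simp [pvSpecO, hs, he, pvQq]
        · have hstep : pvStepA (bs, some h, b) l
              = (bs ++ [(h, PySem.Str.join "\n" b)], some (PySem.Str.slice l (some 3) none), []) := by
            simp [pvStepA, hs, he, pvQq]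
          rw [List.foldl_cons, hstep, ih _ (some _) [] (by simp)]
          simp [pvSpecO, hs, he]
      · have hstep : pvStepA (bs, some h, b) l = (bs, some h, b ++ [l]) := by
          simp [pvStepA, hs]
        rw [List.foldl_cons, hstep, ih _ (some _) (b ++ [l]) (by simp)]
        simp [pvSpecO, hs]

theorem pvSpecN_dropWhile (ls : List String) :
    pvSpecN (ls.dropWhile pvPlain) = pvSpecN ls := by
  induction ls with
  | nil => rfl
  | cons l ls ih =>
    by_cases hs : PySem.Chars.startswith l.toList ['\"', '\"', '\"'] = true
    · simp [List.dropWhile, pvPlain, hs]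
    · simp [List.dropWhile, pvPlain, hs, ih, pvSpecN]

theorem pvSpecO_char (ls : List String) : ∀ (h : String) (b : List String),
    pvSpecO h b ls =
      (h, PySem.Str.join "\n" (b ++ ls.takeWhile pvPlain)) :: pvSpecN (ls.dropWhile pvPlain) := by
  induction ls with
  | nil => intro h b; simp [pvSpecO, pvSpecN]
  | cons l ls ih =>
    intro h b
    by_cases hs : PySem.Chars.startswith l.toList ['\"', '\"', '\"'] = true
    · by_cases he : l = "\"\"\""
      · simp [pvSpecO, hs, he, pvQq, List.takeWhile, List.dropWhile, pvPlain, pvSpecN]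
      · simp [pvSpecO, hs, he, List.takeWhile, List.dropWhile, pvPlain, pvSpecN]
    · simp [pvSpecO, hs, List.takeWhile, List.dropWhile, pvPlain, ih]

theorem pvB_run (ls : List String) :
    ls.foldr pvStepB ([], []) = (pvSpecN ls, ls.takeWhile pvPlain) := by
  induction ls with
  | nil => rfl
  | cons l ls ih =>
    by_cases hs : PySem.Chars.startswith l.toList ['\"', '\"', '\"'] = true
    · by_cases he : l = "\"\"\""
      · simp [List.foldr, ih, pvStepB, he, pvQq, pvSpecN, List.takeWhile, pvPlain]
      · simp [List.foldr, ih, pvStepB, hs, he, pvSpecN, List.takeWhile, pvPlain,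
              pvSpecO_char, pvSpecN_dropWhile]
    · simp [List.foldr, ih, pvStepB, hs, pvSpecN, List.takeWhile, pvPlain]

-- ===== VERDICT (by name: the statement is the Claim_ definition above) =====
theorem extract_blocks_py_spec : Claim_equal_extract_blocks_py := by
  intro s _
  unfold Spec_extract_blocks_py extract_blocks_py extract_blocks_py_alt
  have hA := pvA_run (PySem.Str.splitlines s) [] none [] (fun _ => rfl)
  simp only [pvFinish, List.nil_append] at hA
  rw [List.foldl_reverse, pvB_run]
  exact hA
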